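-- pv_equiv track=rewrite | github.com/k-young-passionate/Baekjoon | python_version/p17143.py | getshark
-- ===== SOURCE A (Python) =====
-- def getshark(r, c, sharks):  # 상어 잡기
--     minrow = r+1
--     for i in range(1, r+1):  # 가장 가까이에 있는 상어 잡기
--         if (i, c) in sharks:
--             if minrow > i:
--                 minrow = i
--     if minrow == r+1:  # 상어 없으면 0 리턴
--         return 0
--
--     size = sharks[(minrow, c)][2]
--     sharks.pop((minrow, c))
--     return size  # 잡은 상어 크기 리턴
-- ===== SOURCE B (Python) =====
-- def getshark(r, c, sharks):
--     # One pass over the dict's actual entries instead of probing every row 1..r.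
--     rows = [row for (row, col) in sharks if col == c and 1 <= row <= r]
--     if not rows:
--         return 0
--     return sharks.pop((min(rows), c))[2]
-- ===== Notes on version B (the rewrite author's own statement) =====
-- stated objective: alternative
-- what changed: B scans the sharks dict's entries once (collect qualifying rows, take min, pop that key) instead of probing every row index 1..r with a membership test; cost is O(len(sharks)) instead of O(r).
import Mathlib
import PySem

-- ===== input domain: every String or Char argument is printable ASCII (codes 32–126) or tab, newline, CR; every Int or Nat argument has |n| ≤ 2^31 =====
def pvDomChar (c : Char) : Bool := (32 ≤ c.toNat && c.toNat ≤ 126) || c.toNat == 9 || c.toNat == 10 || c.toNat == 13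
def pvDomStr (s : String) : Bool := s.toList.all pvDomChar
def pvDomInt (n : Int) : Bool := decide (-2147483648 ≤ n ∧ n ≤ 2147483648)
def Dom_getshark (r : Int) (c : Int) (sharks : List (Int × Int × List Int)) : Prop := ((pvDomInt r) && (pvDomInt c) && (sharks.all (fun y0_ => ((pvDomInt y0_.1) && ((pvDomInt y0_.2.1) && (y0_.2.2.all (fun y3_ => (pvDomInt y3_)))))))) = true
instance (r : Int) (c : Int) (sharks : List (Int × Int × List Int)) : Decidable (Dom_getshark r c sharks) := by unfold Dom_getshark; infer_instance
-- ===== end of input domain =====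

-- B replaces A's probe of every row index 1..r by one pass over the dict's entries
-- (collect qualifying rows, take their min, pop that key): an 'alternative' decomposition.
-- Both A and B mutate `sharks` (pop the caught shark); the theorems below are about the RETURN value only
-- (the popped key is the same on both sides).

-- ===== PORT A =====
-- the loop 'for i in range(1, r+1): if (i,c) in sharks: if minrow > i: minrow = i'
def getsharkMinrow (r : Int) (c : Int) (sharks : List (Int × Int × List Int)) : Int :=
  (PySem.List.pyRange 1 (r + 1) 1).foldl
    (fun minrow i =>
      if sharks.any (fun e => e.1 == i && e.2.1 == c) then
        (if minrow > i then i else minrow)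
      else minrow)
    (r + 1)

def getshark (r : Int) (c : Int) (sharks : List (Int × Int × List Int)) : Int :=
  let minrow := getsharkMinrow r c sharks
  if minrow == r + 1 then 0
  else
    match sharks.find? (fun e => e.1 == minrow && e.2.1 == c) with
    | some e => (PySem.List.pyGet? e.2.2 2).getD 0  -- Python raises IndexError on a too-short list: excluded by Pre_
    | none => 0                                     -- KeyError in Python: unreachable (minrow is a present row)

-- ===== PORT B =====
-- '[row for (row, col) in sharks if col == c and 1 <= row <= r]'
def getsharkRows (r : Int) (c : Int) (sharks : List (Int × Int × List Int)) : List Int :=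
  (sharks.filter (fun e => e.2.1 == c && decide (1 ≤ e.1) && decide (e.1 ≤ r))).map (fun e => e.1)

def getshark_alt (r : Int) (c : Int) (sharks : List (Int × Int × List Int)) : Int :=
  match PySem.List.min? (getsharkRows r c sharks) (fun x => x) with
  | none => 0
  | some m =>
    match sharks.find? (fun e => e.1 == m && e.2.1 == c) with
    | some e => (PySem.List.pyGet? e.2.2 2).getD 0  -- Python raises IndexError on a too-short list: excluded by Pre_
    | none => 0                                     -- KeyError in Python: unreachable (m is a present row)

-- ===== PRECONDITION & SPEC =====
-- Pre_ excludes (a) association lists with a duplicate (row, col) key — these cannot arise from the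
-- Python dict `sharks` at all, so nothing real is thrown away — and (b) inputs where the nearest
-- qualifying shark's description list has fewer than 3 entries, on which BOTH Pythons raise IndexError.
def Pre_getshark (r : Int) (c : Int) (sharks : List (Int × Int × List Int)) : Prop :=
  (sharks.map (fun e => (e.1, e.2.1))).Nodup ∧
  ∀ e ∈ sharks, e.2.1 = c → 1 ≤ e.1 → e.1 ≤ r →
    (∀ e' ∈ sharks, e'.2.1 = c → 1 ≤ e'.1 → e'.1 ≤ r → e.1 ≤ e'.1) → 3 ≤ (e.2.2).length

instance (r : Int) (c : Int) (sharks : List (Int × Int × List Int)) : Decidable (Pre_getshark r c sharks) := by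
  unfold Pre_getshark; infer_instance

def pvWitness_getshark : Int × Int × (List (Int × Int × List Int)) :=
  (3, 1, [(2, 1, [0, 0, 5]), (1, 2, [0, 0, 7])])

def Spec_getshark (r : Int) (c : Int) (sharks : List (Int × Int × List Int)) (out : Int) : Prop := out = getshark_alt r c sharks
instance (r : Int) (c : Int) (sharks : List (Int × Int × List Int)) (out : Int) : Decidable (Spec_getshark r c sharks out) := by unfold Spec_getshark; infer_instance

-- ===== CLAIM (what is proved, stated in full; the proofs are below) =====
def Claim_equal_getshark : Prop := ∀ (r : Int) (c : Int) (sharks : List (Int × Int × List Int)), Dom_getshark r c sharks → Pre_getshark r c sharks → Spec_getshark r c sharks (getshark r c sharks)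

-- ===== LEMMAS AND PROOFS =====

-- A's update step is just `min`, so the range loop is a foldl min over the filtered range.
theorem foldA_eq_foldl_min (P : Int → Bool) (l : List Int) :
    ∀ a : Int, l.foldl (fun m i => if P i then (if m > i then i else m) else m) a
      = (l.filter P).foldl min a := by
  induction l with
  | nil => intro a; simp
  | cons x t ih =>
    intro a
    by_cases h : P x
    · have hx : (if a > x then x else a) = min a x := by
        split_ifs with h' <;> omega
      simp [h, ih, hx]
    · simp [h, ih]

-- foldl min depends only on the set of elements
theorem foldl_min_ext (l₁ l₂ : List Int) (a : Int) (h : ∀ x, x ∈ l₁ ↔ x ∈ l₂) :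
    l₁.foldl min a = l₂.foldl min a := by
  have le₁ := PySem.List.foldl_min_le l₁ a
  have le₂ := PySem.List.foldl_min_le l₂ a
  have m₁ := PySem.List.foldl_min_mem l₁ a
  have m₂ := PySem.List.foldl_min_mem l₂ a
  apply le_antisymm
  · rcases m₂ with h2 | h2
    · rw [h2]; exact le₁.1
    · exact le₁.2 _ ((h _).mpr h2)
  · rcases m₁ with h1 | h1
    · rw [h1]; exact le₂.1
    · exact le₂.2 _ ((h _).mp h1)

-- rows of B are at most r (needed to rule out minrow = r + 1)
theorem rows_le (r c : Int) (sharks : List (Int × Int × List Int)) :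
    ∀ x ∈ getsharkRows r c sharks, x ≤ r := by
  unfold getsharkRows
  simp only [List.mem_map, List.mem_filter, Bool.and_eq_true, decide_eq_true_eq]
  rintro x ⟨e, ⟨_, ⟨_, _⟩, h2⟩, rfl⟩
  exact h2

-- A's minrow is the foldl min over B's row list (with base r+1)
theorem minrow_eq (r c : Int) (sharks : List (Int × Int × List Int)) :
    getsharkMinrow r c sharks = (getsharkRows r c sharks).foldl min (r + 1) := by
  unfold getsharkMinrow
  rw [foldA_eq_foldl_min]
  apply foldl_min_ext
  intro x
  unfold getsharkRows
  simp only [List.mem_filter, PySem.List.mem_pyRange_one, List.any_eq_true, Bool.and_eq_true,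
    beq_iff_eq, List.mem_map, decide_eq_true_eq]
  constructor
  · rintro ⟨⟨h1, h2⟩, e, he, hx, hc⟩
    exact ⟨e, ⟨he, ⟨hc, by omega⟩, by omega⟩, hx⟩
  · rintro ⟨e, ⟨he, ⟨hc, h1⟩, h2⟩, rfl⟩
    exact ⟨⟨h1, by omega⟩, e, he, rfl, hc⟩

-- ===== VERDICT (by name: the statement is the Claim_ definition above) =====
theorem getshark_spec : Claim_equal_getshark := by
  intro r c sharks _dom _pre
  unfold Spec_getshark getshark getshark_alt
  simp only []
  rw [minrow_eq]
  rcases hrows : getsharkRows r c sharks with _ | ⟨x, t⟩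
  · simp [PySem.List.min?]
  · rw [PySem.List.min?_id_cons]
    have hmem : t.foldl min x ∈ getsharkRows r c sharks := by
      rw [hrows]
      rcases PySem.List.foldl_min_mem t x with h1 | h1
      · rw [h1]; exact List.mem_cons_self
      · exact List.mem_cons_of_mem _ h1
    have hmle : ∀ y ∈ getsharkRows r c sharks, t.foldl min x ≤ y := by
      intro y hy
      rw [hrows] at hy
      rcases List.mem_cons.mp hy with h | hy
      · rw [h]; exact (PySem.List.foldl_min_le t x).1
      · exact (PySem.List.foldl_min_le t x).2 _ hy
    have hfl := PySem.List.foldl_min_le (getsharkRows r c sharks) (r + 1)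
    have hfm := PySem.List.foldl_min_mem (getsharkRows r c sharks) (r + 1)
    have hmr : t.foldl min x ≤ r := rows_le r c sharks _ hmem
    have heq : (getsharkRows r c sharks).foldl min (r + 1) = t.foldl min x := by
      rcases hfm with h1 | h1
      · have := hfl.2 _ hmem; omega
      · exact le_antisymm (hfl.2 _ hmem) (hmle _ h1)
    rw [hrows] at heq
    rw [heq]
    have hne : ¬ ((t.foldl min x == r + 1) = true) := by
      simp only [beq_iff_eq]; omega
    rw [if_neg hne]
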